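-- pv_equiv track=rewrite | github.com/thealanle/csv-merge | diagparse.py | parse
-- ===== SOURCE A (Python) =====
-- def parse(observations):
--     obs = []
--     for token in observations.split(', '):
--         token = token.strip()
--         if token[0].islower() and len(obs) > 0:
--             token = obs[-1] + ', ' + token
--             obs[-1] = token
--         else:
--             obs.append(token)
--     return obs
-- ===== SOURCE B (Python) =====
-- def parse(observations):
--     # Single reverse pass: collect a run of lowercase-continued tokens, flush it
--     # into a group when a non-lowercase-starting token (a group head) is met;
--     # a leftover run at the front becomes its own group (A's first token always
--     # starts a group even if it is lowercase).
--     groups = []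
--     run = []
--     for token in reversed(observations.split(', ')):
--         token = token.strip()
--         if token[0].islower():
--             run.insert(0, token)
--         else:
--             groups.insert(0, ', '.join([token] + run))
--             run = []
--     if run:
--         groups.insert(0, ', '.join(run))
--     return groups
-- ===== Notes on version B (the rewrite author's own statement) =====
-- stated objective: alternative
-- what changed: Replaces the forward loop that mutates the last element of the output list in place with a single reverse pass that accumulates a run of lowercase-continued tokens and flushes the joined run as a group when a group-head token is met (a leftover run becomes the first group).
import Mathlib
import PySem

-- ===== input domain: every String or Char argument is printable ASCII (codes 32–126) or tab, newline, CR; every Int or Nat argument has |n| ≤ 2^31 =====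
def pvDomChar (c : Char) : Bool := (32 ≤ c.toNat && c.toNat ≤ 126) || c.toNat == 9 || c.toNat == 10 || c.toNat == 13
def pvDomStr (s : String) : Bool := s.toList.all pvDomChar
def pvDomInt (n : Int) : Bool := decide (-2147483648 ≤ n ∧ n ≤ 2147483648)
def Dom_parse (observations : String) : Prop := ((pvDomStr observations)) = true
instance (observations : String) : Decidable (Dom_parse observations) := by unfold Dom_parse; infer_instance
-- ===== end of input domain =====

-- B replaces A's forward loop that mutates the last accumulated group in place with a
-- single reverse pass keeping a run of lowercase-continued tokens and flushing the run
-- when a group head is met (objective: alternative, same cost).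

-- ===== PORT A =====
-- token[0].islower(): islower of the first code point; an empty token is an IndexError
-- in Python (pyGet? = none), excluded by Pre_parse, so the `none` branch value is never
-- reached on admitted inputs.
def pvHeadLower (t : String) : Bool :=
  match PySem.Str.pyGet? t 0 with
  | some c => PySem.Chars.islower c
  | none => false

-- observations.split(', '): sep ≠ "" so Str.split? is always `some`; getD [] unreachable
def parse (observations : String) : List String :=
  ((PySem.Str.split? observations ", ").getD []).foldl
    (fun obs token =>
      let token := PySem.Str.strip token
      if pvHeadLower token && decide (0 < obs.length) then
        obs.dropLast ++ [obs.getLastD "" ++ ", " ++ token]   -- obs[-1] = obs[-1] + ', ' + token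
      else
        obs ++ [token]) []

-- ===== PORT B =====
-- one reverse-iteration step of Source B's loop: extend the run, or flush it into a group
def pvStepB (token : String) (st : List String × List String) :
    List String × List String :=
  if pvHeadLower token then (st.1, token :: st.2)
  else (PySem.Str.join ", " (token :: st.2) :: st.1, [])

def parse_alt (observations : String) : List String :=
  let st := ((PySem.Str.split? observations ", ").getD []).foldr
    (fun token st => pvStepB (PySem.Str.strip token) st) ([], [])
  if st.2.isEmpty then st.1 else PySem.Str.join ", " st.2 :: st.1

-- ===== PRECONDITION & SPEC =====
-- Pre_ excludes exactly the inputs where some comma-separated token strips to the empty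
-- string: there Python A raises IndexError on token[0] (and B raises likewise).
def Pre_parse (observations : String) : Prop :=
  ∀ t ∈ (PySem.Str.split? observations ", ").getD [], PySem.Str.strip t ≠ ""
instance (observations : String) : Decidable (Pre_parse observations) := by
  unfold Pre_parse; infer_instance

def pvWitness_parse : String := "Abc, def, Ghi"

def Spec_parse (observations : String) (out : List String) : Prop := out = parse_alt observations
instance (observations : String) (out : List String) : Decidable (Spec_parse observations out) := by unfold Spec_parse; infer_instance

-- ===== CLAIM (what is proved, stated in full; the proofs are below) =====
def Claim_equal_parse : Prop := ∀ (observations : String), Dom_parse observations → Pre_parse observations → Spec_parse observations (parse observations)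

-- ===== LEMMAS AND PROOFS =====

-- A's loop body (token already stripped)
def pvStepA (obs : List String) (t : String) : List String :=
  if pvHeadLower t && decide (0 < obs.length) then
    obs.dropLast ++ [obs.getLastD "" ++ ", " ++ t]
  else
    obs ++ [t]

-- the loop bodies as they occur in the ports (strip composed in)
def pvA1 (obs : List String) (token : String) : List String :=
  pvStepA obs (PySem.Str.strip token)
def pvB1 (token : String) (st : List String × List String) :
    List String × List String :=
  pvStepB (PySem.Str.strip token) st

theorem pvJoin_singleton (o : String) : PySem.Str.join ", " [o] = o := by
  simp [PySem.Str.join, PySem.Chars.join, List.intercalate]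

theorem pvJoin_merge (a b : String) (l : List String) :
    PySem.Str.join ", " ((a ++ ", " ++ b) :: l) = PySem.Str.join ", " (a :: b :: l) := by
  cases l with
  | nil => simp [PySem.Str.join, PySem.Chars.join, List.intercalate, List.append_assoc]
  | cons c l' => simp [PySem.Str.join, PySem.Chars.join, List.intercalate, List.append_assoc]

-- loop invariant: a forward fold from a nonempty accumulator os ++ [o] equals os, then o
-- joined with the leading lowercase run of ts, then the groups of the rest of ts
theorem pvL1 (ts : List String) : ∀ (os : List String) (o : String),
    ts.foldl pvA1 (os ++ [o]) =
      os ++ PySem.Str.join ", " (o :: (ts.foldr pvB1 ([], [])).2) ::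
        (ts.foldr pvB1 ([], [])).1 := by
  induction ts with
  | nil => intro os o; simp [pvJoin_singleton]
  | cons t ts ih =>
    intro os o
    simp only [List.foldl_cons, List.foldr_cons]
    by_cases h : pvHeadLower (PySem.Str.strip t)
    · have hstep : pvA1 (os ++ [o]) t = os ++ [o ++ ", " ++ PySem.Str.strip t] := by
        simp [pvA1, pvStepA, h]
      rw [hstep, ih os (o ++ ", " ++ PySem.Str.strip t), pvJoin_merge]
      simp [pvB1, pvStepB, h]
    · have hstep : pvA1 (os ++ [o]) t = (os ++ [o]) ++ [PySem.Str.strip t] := by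
        simp [pvA1, pvStepA, h]
      rw [hstep, ih (os ++ [o]) (PySem.Str.strip t)]
      simp [pvB1, pvStepB, h, pvJoin_singleton]

theorem pvMain (ts : List String) :
    ts.foldl pvA1 [] =
      (if (ts.foldr pvB1 ([], [])).2.isEmpty then (ts.foldr pvB1 ([], [])).1
       else PySem.Str.join ", " (ts.foldr pvB1 ([], [])).2 :: (ts.foldr pvB1 ([], [])).1) := by
  cases ts with
  | nil => rfl
  | cons t ts =>
    rw [List.foldl_cons, List.foldr_cons]
    have hfirst : pvA1 [] t = [] ++ [PySem.Str.strip t] := by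
      simp only [pvA1, pvStepA, List.length_nil]
      norm_num
    rw [hfirst, pvL1 ts [] (PySem.Str.strip t)]
    rcases hst : ts.foldr pvB1 ([], []) with ⟨gs, run⟩
    by_cases h : pvHeadLower (PySem.Str.strip t)
    · simp [pvB1, pvStepB, h]
    · simp [pvB1, pvStepB, h]

-- ===== VERDICT (by name: the statement is the Claim_ definition above) =====
theorem parse_spec : Claim_equal_parse := by
  intro observations _dom _pre
  show parse observations = parse_alt observations
  show ((PySem.Str.split? observations ", ").getD []).foldl pvA1 [] = _
  rw [pvMain]
  rfl
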